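-- pv_equiv track=rewrite | github.com/Luxn1er/melhoria-de-cortes | src/helpers.py | agrupamento_base_sobras
-- ===== SOURCE A (Python) =====
-- from typing import Dict, List, Optional, Tuple
--
-- def normalizar_residuais(res: List[Tuple[int, int]]) -> List[Tuple[int, int]]:
--     """Agrega e ordena (largura, quantidade) decrescente, ignorando quantidades ≤ 0."""
--     acc: Dict[int, int] = {}
--     for w, q in res:
--         if q > 0:
--             acc[w] = acc.get(w, 0) + q
--     return sorted(acc.items(), key=lambda x: x[0], reverse=True)
--
-- def agrupamento_base_sobras(
--     jumbo_mm: int, residuais: List[Tuple[int, int]]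
-- ) -> Tuple[Tuple[int, int] | None, List[Tuple[int, int]]]:
--     """
--     Seleciona a maior largura possível como base, usando até
--     ``min(floor(jumbo / largura), estoque)`` bobinas dessa largura.
--
--     Retorna ``(base, pendentes)``.
--     """
--     if not residuais:
--         return None, []
--     ordenado = sorted(residuais, key=lambda x: x[0], reverse=True)
--     for i, (w, q) in enumerate(ordenado):
--         if w <= 0 or q <= 0:
--             continue
--         max_que_cabem = jumbo_mm // w
--         if max_que_cabem <= 0:
--             continue
--         usar = min(max_que_cabem, q)
--         resto: List[Tuple[int, int]] = []
--         if q > usar: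
--             resto.append((w, q - usar))
--         resto.extend(ordenado[i + 1:])
--         return (w, usar), normalizar_residuais(resto)
--     return None, normalizar_residuais(ordenado)
-- ===== SOURCE B (Python) =====
-- from typing import Dict, List, Optional, Tuple
--
--
-- def normalizar_residuais(res: List[Tuple[int, int]]) -> List[Tuple[int, int]]:
--     """Agrega e ordena (largura, quantidade) decrescente, ignorando quantidades <= 0."""
--     acc: Dict[int, int] = {}
--     for w, q in res:
--         if q > 0:
--             acc[w] = acc.get(w, 0) + q
--     return sorted(acc.items(), key=lambda x: x[0], reverse=True)
--
--
-- def agrupamento_base_sobras(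
--     jumbo_mm: int, residuais: List[Tuple[int, int]]
-- ) -> Tuple[Tuple[int, int] | None, List[Tuple[int, int]]]:
--     # one unsorted pass: first entry holding the largest usable width
--     best = None
--     for w, q in residuais:
--         if q > 0 and 0 < w <= jumbo_mm and (best is None or best[0] < w):
--             best = (w, q)
--     if best is None:
--         return None, normalizar_residuais(residuais)
--     base_w, q_base = best
--     usar = min(jumbo_mm // base_w, q_base)
--     # aggregate everything not wider than the base, then take the used coils out
--     pend: Dict[int, int] = {}
--     for w, q in residuais:
--         if q > 0 and w <= base_w:
--             pend[w] = pend.get(w, 0) + q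
--     pend[base_w] -= usar
--     pendentes = [item for item in pend.items() if item[1] > 0]
--     return (base_w, usar), sorted(pendentes, key=lambda x: x[0], reverse=True)
-- ===== Notes on version B (the rewrite author's own statement) =====
-- stated objective: alternative
-- what changed: Replaces A's sort-descending-then-scan-then-slice with one unsorted pass that picks the first entry holding the largest usable width, plus a single filtered dict aggregation from which the used coils are subtracted; only the final small residual list is sorted.
import Mathlib
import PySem

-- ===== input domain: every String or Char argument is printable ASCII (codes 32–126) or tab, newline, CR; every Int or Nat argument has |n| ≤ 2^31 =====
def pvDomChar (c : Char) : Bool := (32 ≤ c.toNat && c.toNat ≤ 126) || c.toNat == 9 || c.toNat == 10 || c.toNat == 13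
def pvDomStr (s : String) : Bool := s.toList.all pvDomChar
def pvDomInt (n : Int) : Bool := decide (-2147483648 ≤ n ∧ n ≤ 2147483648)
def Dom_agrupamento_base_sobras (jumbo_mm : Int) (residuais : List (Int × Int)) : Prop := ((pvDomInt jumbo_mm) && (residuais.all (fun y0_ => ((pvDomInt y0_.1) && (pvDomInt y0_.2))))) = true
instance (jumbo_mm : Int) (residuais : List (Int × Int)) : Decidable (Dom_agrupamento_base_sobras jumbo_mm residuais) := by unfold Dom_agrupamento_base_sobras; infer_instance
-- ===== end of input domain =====

-- B replaces A's sort-then-scan-then-slice by a max-finding pass plus one filtered aggregation (alternative decomposition, same results).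

-- ===== PORT A =====
-- shared module helper (both Source A and Source B define normalizar_residuais verbatim)
def normalizar (res : List (Int × Int)) : List (Int × Int) :=
  let acc : PySem.Dict Int Int :=
    res.foldl (fun d p => if 0 < p.2 then d.modify p.1 0 (· + p.2) else d) PySem.Dict.empty
  PySem.List.sorted acc.items (fun x => x.1) true

-- the 'for i, (w, q) in enumerate(ordenado)' loop; the tail of the list is ordenado[i+1:]
def agrupLoopA (jumbo_mm : Int) : List (Int × Int) → Option ((Int × Int) × List (Int × Int))
  | [] => none
  | (w, q) :: rest =>
    if w ≤ 0 ∨ q ≤ 0 then agrupLoopA jumbo_mm rest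
    else
      let max_que_cabem := PySem.Int.floordiv jumbo_mm w
      if max_que_cabem ≤ 0 then agrupLoopA jumbo_mm rest
      else
        let usar := min max_que_cabem q
        let resto := (if usar < q then [(w, q - usar)] else []) ++ rest
        some ((w, usar), normalizar resto)

def agrupamento_base_sobras (jumbo_mm : Int) (residuais : List (Int × Int)) : (Option (Int × Int)) × (List (Int × Int)) :=
  if residuais = [] then (none, [])
  else
    let ordenado := PySem.List.sorted residuais (fun x => x.1) true
    match agrupLoopA jumbo_mm ordenado with
    | some r => (some r.1, r.2)
    | none => (none, normalizar ordenado)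

-- ===== PORT B =====
def agrupamento_base_sobras_alt (jumbo_mm : Int) (residuais : List (Int × Int)) : (Option (Int × Int)) × (List (Int × Int)) :=
  let best : Option (Int × Int) :=
    residuais.foldl
      (fun b p =>
        if 0 < p.2 ∧ 0 < p.1 ∧ p.1 ≤ jumbo_mm ∧ (∀ s ∈ b, s.1 < p.1) then some p else b)
      none
  match best with
  | none => (none, normalizar residuais)
  | some (base_w, q_base) =>
    let usar := min (PySem.Int.floordiv jumbo_mm base_w) q_base
    let pend : PySem.Dict Int Int :=
      residuais.foldl (fun d p => if 0 < p.2 ∧ p.1 ≤ base_w then d.modify p.1 0 (· + p.2) else d)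
        PySem.Dict.empty
    let pend := pend.modify base_w 0 (· - usar)
    let pendentes := pend.items.filter (fun it => 0 < it.2)
    ((base_w, usar), PySem.List.sorted pendentes (fun x => x.1) true)

-- ===== PRECONDITION & SPEC =====
def Spec_agrupamento_base_sobras (jumbo_mm : Int) (residuais : List (Int × Int)) (out : (Option (Int × Int)) × (List (Int × Int))) : Prop := out = agrupamento_base_sobras_alt jumbo_mm residuais
instance (jumbo_mm : Int) (residuais : List (Int × Int)) (out : (Option (Int × Int)) × (List (Int × Int))) : Decidable (Spec_agrupamento_base_sobras jumbo_mm residuais out) := by unfold Spec_agrupamento_base_sobras; infer_instance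

-- ===== CLAIM (what is proved, stated in full; the proofs are below) =====
def Claim_equal_agrupamento_base_sobras : Prop := ∀ (jumbo_mm : Int) (residuais : List (Int × Int)), Dom_agrupamento_base_sobras jumbo_mm residuais → Spec_agrupamento_base_sobras jumbo_mm residuais (agrupamento_base_sobras jumbo_mm residuais)

-- ===== LEMMAS AND PROOFS =====

def pvValid (j : Int) (p : Int × Int) : Bool :=
  decide (0 < p.2) && decide (0 < p.1) && decide (p.1 ≤ j)
def pvBfStep (j : Int) : Option (Int × Int) → (Int × Int) → Option (Int × Int) :=
  fun b p => if 0 < p.2 ∧ 0 < p.1 ∧ p.1 ≤ j ∧ (∀ s ∈ b, s.1 < p.1) then some p else b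

lemma pv_insertBy_filter (W : Int) (x : Int × Int) (ys : List (Int × Int))
    (hys : ys.Pairwise (fun a b => b.1 ≤ a.1)) :
    (PySem.List.insertBy (fun a b => decide (b.1 < a.1)) x ys).filter (fun p => p.1 == W)
      = ys.filter (fun p => p.1 == W) ++ (if x.1 == W then [x] else []) := by
  induction ys with
  | nil => simp [PySem.List.insertBy]; split <;> simp_all
  | cons y t ih =>
    rw [List.pairwise_cons] at hys
    simp only [PySem.List.insertBy]
    by_cases hlt : y.1 < x.1
    · rw [if_pos (by simp [hlt])]
      by_cases hxW : x.1 = W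
      · have htW : (y :: t).filter (fun p => p.1 == W) = [] := by
          rw [List.filter_eq_nil_iff]
          intro a ha
          rcases List.mem_cons.mp ha with rfl | ha
          · simp; omega
          · have := hys.1 a ha
            simp; omega
        rw [List.filter_cons, if_pos (by simp [hxW]), htW]
        simp [hxW]
      · rw [List.filter_cons, if_neg (by simp [hxW])]
        simp [hxW]
    · rw [if_neg (by simp [hlt])]
      rw [List.filter_cons, List.filter_cons, ih hys.2]
      by_cases hyW : y.1 = W <;> simp [hyW]
lemma pv_filter_sorted_rev (l : List (Int × Int)) (W : Int) :
    (PySem.List.sorted l (fun x => x.1) true).filter (fun p => p.1 == W)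
      = l.filter (fun p => p.1 == W) := by
  induction l using List.reverseRecOn with
  | nil => rfl
  | append_singleton t x ih =>
    have h1 : PySem.List.sorted (t ++ [x]) (fun p : Int × Int => p.1) true
        = PySem.List.insertBy (fun a b => decide (b.1 < a.1)) x
            (PySem.List.sorted t (fun p : Int × Int => p.1) true) := by
      rw [PySem.List.sorted_rev_eq_foldl_insertBy, PySem.List.sorted_rev_eq_foldl_insertBy,
        List.foldl_append]
      rfl
    rw [h1, pv_insertBy_filter W x _ (PySem.List.sorted_pairwise_rev t _), ih, List.filter_append]
    simp [List.filter_cons]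
lemma pv_bf_none (j : Int) (l : List (Int × Int)) (b : Option (Int × Int)) :
    l.foldl (pvBfStep j) b = none ↔ b = none ∧ ∀ p ∈ l, pvValid j p = false := by
  induction l generalizing b with
  | nil => simp
  | cons p t ih =>
    simp only [List.foldl_cons, ih, pvBfStep]
    constructor
    · rintro ⟨hb, ht⟩
      split at hb
      · exact absurd hb (by simp)
      · rename_i hc
        refine ⟨hb, fun x hx => ?_⟩
        rcases List.mem_cons.mp hx with rfl | hx
        · by_contra hv
          rw [Bool.not_eq_false] at hv
          simp only [pvValid, Bool.and_eq_true, decide_eq_true_eq] at hv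
          exact hc ⟨hv.1.1, hv.1.2, hv.2, by simp [hb]⟩
        · exact ht x hx
    · rintro ⟨hb, hall⟩
      have hp := hall p (by simp)
      have hc : ¬(0 < p.2 ∧ 0 < p.1 ∧ p.1 ≤ j ∧ (∀ s ∈ b, s.1 < p.1)) := by
        simp only [pvValid] at hp
        intro ⟨h2, h1, hj, _⟩
        simp [h2, h1, hj] at hp
      rw [if_neg hc]
      exact ⟨hb, fun x hx => hall x (by simp [hx])⟩

lemma pv_valid_iff (j : Int) (x : Int × Int) :
    pvValid j x = true ↔ (0 < x.2 ∧ 0 < x.1 ∧ x.1 ≤ j) := by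
  simp [pvValid, and_assoc]

lemma pv_bf_strong (j : Int) (l : List (Int × Int)) (b : Option (Int × Int)) (r : Int × Int)
    (h : l.foldl (pvBfStep j) b = some r) :
    (∀ x ∈ l, pvValid j x = true → x.1 ≤ r.1) ∧ (∀ s, b = some s → s.1 ≤ r.1) ∧
      (b = some r ∨ (r ∈ l ∧ pvValid j r = true)) := by
  induction l generalizing b with
  | nil => simp_all
  | cons p t ih =>
    rw [List.foldl_cons] at h
    obtain ⟨ih1, ih2, ih3⟩ := ih _ h
    by_cases hc : 0 < p.2 ∧ 0 < p.1 ∧ p.1 ≤ j ∧ (∀ s ∈ b, s.1 < p.1)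
    · have hb' : pvBfStep j b p = some p := by unfold pvBfStep; exact if_pos hc
      rw [hb'] at ih2 ih3
      refine ⟨?_, ?_, ?_⟩
      · intro x hx hv
        rcases List.mem_cons.mp hx with rfl | hx
        · exact ih2 x rfl
        · exact ih1 x hx hv
      · intro s hs
        have hps := ih2 p rfl
        have := hc.2.2.2 s hs
        omega
      · rcases ih3 with h3 | h3
        · have hrp : p = r := Option.some_inj.mp h3
          subst hrp
          exact Or.inr ⟨by simp, (pv_valid_iff j p).mpr ⟨hc.1, hc.2.1, hc.2.2.1⟩⟩
        · exact Or.inr ⟨by simp [h3.1], h3.2⟩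
    · have hb' : pvBfStep j b p = b := by unfold pvBfStep; exact if_neg hc
      rw [hb'] at ih2 ih3
      refine ⟨?_, ih2, ?_⟩
      · intro x hx hv
        rcases List.mem_cons.mp hx with rfl | hx
        · -- x = p is valid but was not taken: b = some s with x.1 ≤ s.1 ≤ r.1
          rw [pv_valid_iff] at hv
          cases b with
          | none => exact absurd ⟨hv.1, hv.2.1, hv.2.2, by simp⟩ hc
          | some s =>
            have hs := ih2 s rfl
            by_cases hlt : s.1 < x.1
            · exact absurd ⟨hv.1, hv.2.1, hv.2.2, by simpa using hlt⟩ hc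
            · omega
        · exact ih1 x hx hv
      · rcases ih3 with h3 | h3
        · exact Or.inl h3
        · exact Or.inr ⟨by simp [h3.1], h3.2⟩

lemma pv_bf_first (j : Int) (l : List (Int × Int)) (b : Option (Int × Int)) (r : Int × Int)
    (h : l.foldl (pvBfStep j) b = some r) :
    b = some r ∨ ∃ l₁ l₂, l = l₁ ++ r :: l₂ ∧ (∀ x ∈ l₁, ¬(pvValid j x = true ∧ r.1 ≤ x.1)) ∧
      (∀ s, b = some s → s.1 < r.1) ∧ pvValid j r = true := by
  induction l generalizing b with
  | nil => simp_all
  | cons p t ih =>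
    rw [List.foldl_cons] at h
    by_cases hc : 0 < p.2 ∧ 0 < p.1 ∧ p.1 ≤ j ∧ (∀ s ∈ b, s.1 < p.1)
    · have hb' : pvBfStep j b p = some p := by unfold pvBfStep; exact if_pos hc
      rw [hb'] at h
      rcases ih _ h with h3 | ⟨l₁, l₂, hsplit, hl₁, hbs, hvr⟩
      · -- the head itself wins
        have hrp : p = r := Option.some_inj.mp h3
        subst hrp
        refine Or.inr ⟨[], t, by simp, by simp, ?_, ?_⟩
        · intro s hs
          subst hs
          exact hc.2.2.2 s (by simp)
        · exact (pv_valid_iff j p).mpr ⟨hc.1, hc.2.1, hc.2.2.1⟩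
      · have hpr : p.1 < r.1 := hbs p rfl
        refine Or.inr ⟨p :: l₁, l₂, by simp [hsplit], ?_, ?_, hvr⟩
        · intro x hx
          rcases List.mem_cons.mp hx with rfl | hx
          · intro ⟨_, hge⟩; omega
          · exact hl₁ x hx
        · intro s hs
          have := hc.2.2.2 s hs
          omega
    · have hb' : pvBfStep j b p = b := by unfold pvBfStep; exact if_neg hc
      rw [hb'] at h
      rcases ih _ h with h3 | ⟨l₁, l₂, hsplit, hl₁, hbs, hvr⟩
      · exact Or.inl h3
      · refine Or.inr ⟨p :: l₁, l₂, by simp [hsplit], ?_, hbs, hvr⟩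
        intro x hx
        rcases List.mem_cons.mp hx with rfl | hx
        · rintro ⟨hv, hge⟩
          rw [pv_valid_iff] at hv
          cases b with
          | none => exact hc ⟨hv.1, hv.2.1, hv.2.2, by simp⟩
          | some s =>
            have hs := hbs s rfl
            by_cases hlt : s.1 < x.1
            · exact hc ⟨hv.1, hv.2.1, hv.2.2, by simpa using hlt⟩
            · omega
        · exact hl₁ x hx

def pvAcc (g : Int × Int → Prop) [DecidablePred g] (l : List (Int × Int)) : PySem.Dict Int Int :=
  l.foldl (fun d p => if g p then d.modify p.1 0 (· + p.2) else d) PySem.Dict.empty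
lemma pv_wsum (l : List (Int × Int)) (d : PySem.Dict Int Int) (k : Int) :
    (l.foldl (fun d p => d.modify p.1 0 (· + p.2)) d).getD k 0
      = d.getD k 0 + ((l.filter (fun p => p.1 == k)).map (·.2)).sum := by
  induction l generalizing d with
  | nil => simp
  | cons p t ih =>
    simp only [List.foldl_cons, ih, List.filter_cons]
    rw [PySem.Dict.getD_modify]
    by_cases hk : p.1 = k
    · simp [hk]; omega
    · simp [hk, Ne.symm hk]
lemma pv_acc_getD (g : Int × Int → Prop) [DecidablePred g] (l : List (Int × Int)) (k : Int) :
    (pvAcc g l).getD k 0 = ((l.filter (fun p => decide (g p) && (p.1 == k))).map (·.2)).sum := by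
  unfold pvAcc
  rw [PySem.List.foldl_ite_eq_foldl_filter, pv_wsum, List.filter_filter]
  simp only [PySem.Dict.getD_empty, zero_add]
  congr 2
  apply List.filter_congr
  intro x _
  rw [Bool.and_comm]
lemma pv_acc_keys (g : Int × Int → Prop) [DecidablePred g] (l : List (Int × Int)) :
    (pvAcc g l).keys = PySem.Set.ofList ((l.filter (fun p => decide (g p))).map (·.1)) := by
  unfold pvAcc
  rw [PySem.List.foldl_ite_eq_foldl_filter]
  rw [PySem.Dict.keys_foldl_modify_key (l.filter (fun p => decide (g p))) (fun p => p.1) 0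
    (fun _ p => (· + p.2)) PySem.Dict.empty]
  simp [PySem.Set.update, PySem.Set.ofList_eq_foldl, PySem.Dict.keys_empty]
lemma pv_acc_nodup (g : Int × Int → Prop) [DecidablePred g] (l : List (Int × Int)) :
    (pvAcc g l).keys.Nodup := by
  rw [pv_acc_keys]; exact PySem.Set.nodup_ofList _
lemma pv_acc_mem_keys (g : Int × Int → Prop) [DecidablePred g] (l : List (Int × Int)) (k : Int) :
    k ∈ (pvAcc g l).keys ↔ ∃ p ∈ l, g p ∧ p.1 = k := by
  rw [pv_acc_keys, PySem.Set.mem_ofList]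
  simp
lemma pv_get?_char (d : PySem.Dict Int Int) (k v : Int) :
    d.get? k = some v ↔ k ∈ d.keys ∧ d.getD k 0 = v := by
  constructor
  · intro h
    refine ⟨?_, ?_⟩
    · by_contra hk
      rw [← PySem.Dict.get?_eq_none_iff_not_mem_keys] at hk
      simp [hk] at h
    · rw [PySem.Dict.getD_eq_get?_getD, h]; rfl
  · rintro ⟨hk, hv⟩
    cases hg : d.get? k with
    | none => exact absurd ((PySem.Dict.get?_eq_none_iff_not_mem_keys d k).mp hg) (by simp [hk])
    | some w =>
      rw [PySem.Dict.getD_eq_get?_getD, hg] at hv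
      simp only [Option.getD_some] at hv
      rw [hv]
lemma pv_items_perm_of_get?_eq (d₁ d₂ : PySem.Dict Int Int)
    (h₁ : d₁.keys.Nodup) (h₂ : d₂.keys.Nodup) (h : ∀ k, d₁.get? k = d₂.get? k) :
    d₁.items.Perm d₂.items := by
  have n₁ : d₁.items.Nodup := h₁.of_map _
  have n₂ : d₂.items.Nodup := h₂.of_map _
  rw [List.perm_ext_iff_of_nodup n₁ n₂]
  intro a
  rw [← PySem.Dict.get?_eq_some_iff_mem_items d₁ a.1 a.2 h₁,
      ← PySem.Dict.get?_eq_some_iff_mem_items d₂ a.1 a.2 h₂, h]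
lemma pv_sorted_rev_fst_congr (m₁ m₂ : List (Int × Int))
    (h₁ : (m₁.map (·.1)).Nodup) (hperm : m₁.Perm m₂) :
    PySem.List.sorted m₁ (fun x => x.1) true = PySem.List.sorted m₂ (fun x => x.1) true := by
  have hy : (PySem.List.sorted m₁ (fun x => x.1) true).Perm m₁ := PySem.List.sorted_perm _ _ _
  have hnd : ((PySem.List.sorted m₁ (fun x => x.1) true).map (·.1)).Nodup :=
    (hy.map (·.1)).nodup_iff.mpr h₁
  have hge := PySem.List.sorted_pairwise_rev (xs := m₁) (key := fun x => x.1)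
  have hgt : (PySem.List.sorted m₁ (fun x => x.1) true).Pairwise (fun a b => b.1 < a.1) := by
    have hne : (PySem.List.sorted m₁ (fun x => x.1) true).Pairwise (fun a b => a.1 ≠ b.1) :=
      (List.pairwise_map).mp hnd
    exact (hge.and hne).imp (fun h => lt_of_le_of_ne h.1 h.2.symm)
  rw [PySem.List.sorted_rev_eq_of_perm_of_pairwise_gt m₂ _ _ (hy.trans hperm) hgt,
      PySem.List.sorted_rev_eq_of_perm_of_pairwise_gt m₁ _ _ hy hgt]
lemma pv_possum (m : List (Int × Int)) (h : ∀ x ∈ m, 0 < x.2) :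
    0 ≤ (m.map (·.2)).sum ∧ (0 < (m.map (·.2)).sum ↔ m ≠ []) := by
  induction m with
  | nil => simp
  | cons p t ih =>
    have hp := h p (by simp)
    have ih' := ih (fun x hx => h x (by simp [hx]))
    simp only [List.map_cons, List.sum_cons]
    constructor
    · omega
    · constructor
      · intro _; simp
      · intro _; omega

lemma pv_floordiv_pos_iff (j w : Int) (hw : 0 < w) :
    (0 < PySem.Int.floordiv j w) ↔ w ≤ j := by
  constructor
  · intro h
    have := (PySem.Int.le_floordiv_iff_mul_le (a := j) (b := w) (q := 1) hw).mp (by omega)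
    omega
  · intro h
    have := (PySem.Int.le_floordiv_iff_mul_le (a := j) (b := w) (q := 1) hw).mpr (by omega)
    omega


lemma pv_loop_none (j : Int) (l : List (Int × Int)) :
    agrupLoopA j l = none ↔ ∀ p ∈ l, pvValid j p = false := by
  induction l with
  | nil => simp [agrupLoopA]
  | cons p t ih =>
    obtain ⟨w, q⟩ := p
    simp only [agrupLoopA]
    by_cases h1 : w ≤ 0 ∨ q ≤ 0
    · rw [if_pos h1, ih]
      constructor
      · intro hall x hx
        rcases List.mem_cons.mp hx with rfl | hx
        · simp [pvValid]; omega
        · exact hall x hx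
      · intro hall x hx
        exact hall x (by simp [hx])
    · rw [if_neg h1]
      push Not at h1
      by_cases h2 : PySem.Int.floordiv j w ≤ 0
      · rw [if_pos h2, ih]
        have hwj : ¬ w ≤ j := by
          intro hle
          have := (pv_floordiv_pos_iff j w h1.1).mpr hle
          omega
        constructor
        · intro hall x hx
          rcases List.mem_cons.mp hx with rfl | hx
          · simp [pvValid]; omega
          · exact hall x hx
        · intro hall x hx
          exact hall x (by simp [hx])
      · rw [if_neg h2]
        constructor
        · intro hsome; exact absurd hsome (by simp)
        · intro hall
          have := hall (w, q) (by simp)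
          have hwj : w ≤ j := by
            by_contra hc
            push Not at hc
            have := (pv_floordiv_pos_iff j w h1.1)
            omega
          simp [pvValid] at this
          omega

lemma pv_loop_some (j : Int) (l : List (Int × Int)) (out : (Int × Int) × List (Int × Int))
    (h : agrupLoopA j l = some out) :
    ∃ pre p post, l = pre ++ p :: post ∧ (∀ x ∈ pre, pvValid j x = false) ∧
      pvValid j p = true ∧
      out = ((p.1, min (PySem.Int.floordiv j p.1) p.2),
        normalizar ((if min (PySem.Int.floordiv j p.1) p.2 < p.2 then
          [(p.1, p.2 - min (PySem.Int.floordiv j p.1) p.2)] else []) ++ post)) := by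
  induction l with
  | nil => simp [agrupLoopA] at h
  | cons p t ih =>
    obtain ⟨w, q⟩ := p
    simp only [agrupLoopA] at h
    by_cases h1 : w ≤ 0 ∨ q ≤ 0
    · rw [if_pos h1] at h
      obtain ⟨pre, p', post, hsplit, hpre, hp, hout⟩ := ih h
      exact ⟨(w, q) :: pre, p', post, by simp [hsplit], by
        intro x hx
        rcases List.mem_cons.mp hx with rfl | hx
        · simp [pvValid]; omega
        · exact hpre x hx, hp, hout⟩
    · rw [if_neg h1] at h
      push Not at h1
      by_cases h2 : PySem.Int.floordiv j w ≤ 0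
      · rw [if_pos h2] at h
        obtain ⟨pre, p', post, hsplit, hpre, hp, hout⟩ := ih h
        have hwj : ¬ w ≤ j := by
          intro hle
          have := (pv_floordiv_pos_iff j w h1.1).mpr hle
          omega
        exact ⟨(w, q) :: pre, p', post, by simp [hsplit], by
          intro x hx
          rcases List.mem_cons.mp hx with rfl | hx
          · simp [pvValid]; omega
          · exact hpre x hx, hp, hout⟩
      · rw [if_neg h2] at h
        refine ⟨[], (w, q), t, by simp, by simp, ?_, ?_⟩
        · have hwj : w ≤ j := by
            by_contra hc
            push Not at hc
            have := (pv_floordiv_pos_iff j w h1.1)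
            omega
          simp [pvValid]
          omega
        · simpa using h.symm

-- keys of the adjusted dict are the keys of the aggregate
lemma pv_modify_keys (d : PySem.Dict Int Int) (W u : Int) (hW : W ∈ d.keys) :
    (d.modify W 0 (· - u)).keys = d.keys := by
  rw [PySem.Dict.keys_modify, PySem.Dict.keys_insert_of_contains]
  exact (PySem.Dict.contains_iff_mem_keys d W).mpr hW

lemma pv_key_iff (j : Int) (l pre post : List (Int × Int)) (p : Int × Int)
    (hsplit : PySem.List.sorted l (fun x => x.1) true = pre ++ p :: post)
    (hpre_inv : ∀ x ∈ pre, pvValid j x = false)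
    (hpv : pvValid j p = true) (k v : Int) :
    ((pvAcc (fun x => 0 < x.2)
        ((if min (PySem.Int.floordiv j p.1) p.2 < p.2 then
            [(p.1, p.2 - min (PySem.Int.floordiv j p.1) p.2)] else []) ++ post)).get? k = some v)
      ↔ (((pvAcc (fun x => 0 < x.2 ∧ x.1 ≤ p.1) l).modify p.1 0
            (· - min (PySem.Int.floordiv j p.1) p.2)).get? k = some v ∧ 0 < v) := by
  set W := p.1 with hWdef
  set u := min (PySem.Int.floordiv j W) p.2 with hudef
  rw [pv_valid_iff] at hpv
  obtain ⟨hp2, hp1, hpj⟩ := hpv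
  have hperm : l.Perm (pre ++ p :: post) := by
    rw [← hsplit]; exact (PySem.List.sorted_perm _ _ _).symm
  -- order facts
  have hpair := PySem.List.sorted_pairwise_rev (xs := l) (key := fun x : Int × Int => x.1)
  rw [hsplit, List.pairwise_append] at hpair
  have hpre_ge : ∀ x ∈ pre, W ≤ x.1 := fun x hx => hpair.2.2 x hx p (by simp)
  have hpost_le : ∀ y ∈ post, y.1 ≤ W := (List.pairwise_cons.mp hpair.2.1).1
  -- no positive entry of width W sits in pre
  have hpreW : ∀ x ∈ pre, ¬(0 < x.2 ∧ x.1 = W) := by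
    rintro x hx ⟨hx2, hx1⟩
    have := hpre_inv x hx
    rw [Bool.eq_false_iff, Ne, pv_valid_iff] at this
    exact this ⟨hx2, hx1 ▸ hp1, hx1 ▸ hpj⟩
  have hple : p ∈ l := hperm.mem_iff.mpr (by simp)
  have humin : u ≤ p.2 := min_le_right _ _
  -- the two get? characterisations
  rw [pv_get?_char, pv_get?_char, pv_acc_mem_keys,
    pv_modify_keys _ _ _ (by
      exact (pv_acc_mem_keys _ l W).mpr ⟨p, hple, ⟨hp2, le_refl _⟩, rfl⟩),
    pv_acc_mem_keys, PySem.Dict.getD_modify, pv_acc_getD, pv_acc_getD, pv_acc_getD]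
  -- helper: existence of a positive width-k entry is non-emptiness of the filter
  have hex : ∀ (m : List (Int × Int)),
      (∃ x ∈ m, 0 < x.2 ∧ x.1 = k) ↔ m.filter (fun x => decide (0 < x.2) && (x.1 == k)) ≠ [] := by
    intro m
    rw [Ne, List.filter_eq_nil_iff]
    push Not
    simp
  -- filters over l transferred to the split of the sorted list
  have hsum_perm : ∀ (q : Int × Int → Bool),
      ((l.filter q).map (·.2)).sum = (((pre ++ p :: post).filter q).map (·.2)).sum :=
    fun q => ((hperm.filter q).map _).sum_eq
  have hmem_perm : ∀ (P : Int × Int → Prop),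
      (∃ x ∈ l, P x) ↔ (∃ x ∈ pre ++ p :: post, P x) := by
    intro P
    constructor
    · rintro ⟨x, hx, hPx⟩; exact ⟨x, hperm.mem_iff.mp hx, hPx⟩
    · rintro ⟨x, hx, hPx⟩; exact ⟨x, hperm.mem_iff.mpr hx, hPx⟩
  rcases lt_trichotomy k W with hk | hk | hk
  · -- k < W : the base row and pre do not matter
    rw [if_neg (by omega : ¬ k = W)]
    have hmemA : (∃ x ∈ (if u < p.2 then [(p.1, p.2 - u)] else []) ++ post, 0 < x.2 ∧ x.1 = k)
        ↔ (∃ x ∈ post, 0 < x.2 ∧ x.1 = k) := by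
      constructor
      · rintro ⟨x, hx, hP⟩
        rcases List.mem_append.mp hx with hx | hx
        · exfalso
          split at hx
          · rw [List.mem_singleton] at hx
            subst hx
            simp at hP
            omega
          · simp at hx
        · exact ⟨x, hx, hP⟩
      · rintro ⟨x, hx, hP⟩
        exact ⟨x, List.mem_append.mpr (Or.inr hx), hP⟩
    have hmemB : (∃ x ∈ l, (0 < x.2 ∧ x.1 ≤ W) ∧ x.1 = k)
        ↔ (∃ x ∈ post, 0 < x.2 ∧ x.1 = k) := by
      rw [hmem_perm]
      constructor
      · rintro ⟨x, hx, ⟨hx2, _⟩, hx1⟩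
        rcases List.mem_append.mp hx with hx | hx
        · exact absurd (hpre_ge x hx) (by rw [hx1]; omega)
        · rcases List.mem_cons.mp hx with rfl | hx
          · omega
          · exact ⟨x, hx, hx2, hx1⟩
      · rintro ⟨x, hx, hx2, hx1⟩
        exact ⟨x, List.mem_append.mpr (Or.inr (List.mem_cons.mpr (Or.inr hx))),
          ⟨hx2, by omega⟩, hx1⟩
    have hsumA : ((((if u < p.2 then [(p.1, p.2 - u)] else []) ++ post).filter
        (fun x => decide (0 < x.2) && (x.1 == k))).map (·.2)).sum
        = ((post.filter (fun x => decide (0 < x.2) && (x.1 == k))).map (·.2)).sum := by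
      rw [List.filter_append]
      have : (if u < p.2 then [(p.1, p.2 - u)] else []).filter
          (fun x => decide (0 < x.2) && (x.1 == k)) = [] := by
        split
        · simp
          omega
        · simp
      rw [this, List.nil_append]
    have hsumB : ((l.filter (fun x => decide (0 < x.2 ∧ x.1 ≤ W) && (x.1 == k))).map (·.2)).sum
        = ((post.filter (fun x => decide (0 < x.2) && (x.1 == k))).map (·.2)).sum := by
      rw [hsum_perm, List.filter_append, List.filter_cons]
      have h1 : pre.filter (fun x => decide (0 < x.2 ∧ x.1 ≤ W) && (x.1 == k)) = [] := by
        rw [List.filter_eq_nil_iff]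
        intro a ha
        have := hpre_ge a ha
        simp
        omega
      have h2 : ¬ (decide (0 < p.2 ∧ p.1 ≤ W) && (p.1 == k)) = true := by
        simp
        omega
      rw [h1, if_neg h2, List.nil_append]
      congr 2
      apply List.filter_congr
      intro x hx
      have := hpost_le x hx
      by_cases hxk : x.1 = k
      · simp [hxk]
        omega
      · have hb : (x.1 == k) = false := by simp [hxk]
        rw [hb]
        simp
    rw [hmemA, hmemB, hsumA, hsumB]
    have hposf : ∀ x ∈ post.filter (fun x => decide (0 < x.2) && (x.1 == k)), 0 < x.2 := by
      intro x hx
      have := List.of_mem_filter hx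
      simp at this
      exact this.1
    have hps := pv_possum _ hposf
    rw [hex post]
    constructor
    · rintro ⟨hne, hv⟩
      exact ⟨⟨hne, hv⟩, hv ▸ hps.2.mpr hne⟩
    · rintro ⟨h, -⟩
      exact h
  · -- k = W : the base bucket loses u
    subst hk
    rw [if_pos rfl]
    have hmemB : (∃ x ∈ l, (0 < x.2 ∧ x.1 ≤ W) ∧ x.1 = W) := ⟨p, hple, ⟨hp2, le_refl _⟩, rfl⟩
    have hposf : ∀ x ∈ post.filter (fun x => decide (0 < x.2) && (x.1 == W)), 0 < x.2 := by
      intro x hx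
      have := List.of_mem_filter hx
      simp at this
      exact this.1
    have hps := pv_possum _ hposf
    have hsumB : ((l.filter (fun x => decide (0 < x.2 ∧ x.1 ≤ W) && (x.1 == W))).map (·.2)).sum
        = p.2 + ((post.filter (fun x => decide (0 < x.2) && (x.1 == W))).map (·.2)).sum := by
      rw [hsum_perm, List.filter_append, List.filter_cons]
      have h1 : pre.filter (fun x => decide (0 < x.2 ∧ x.1 ≤ W) && (x.1 == W)) = [] := by
        rw [List.filter_eq_nil_iff]
        intro a ha
        have := hpreW a ha
        simp
        intro h2 _ h1
        exact absurd ⟨h2, h1⟩ this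
      have h2 : (decide (0 < p.2 ∧ p.1 ≤ W) && (p.1 == W)) = true := by
        simp [hp2]
        exact ⟨hWdef.ge, hWdef.symm⟩
      have hfc : post.filter (fun x => decide (0 < x.2 ∧ x.1 ≤ W) && (x.1 == W))
          = post.filter (fun x => decide (0 < x.2) && (x.1 == W)) := by
        apply List.filter_congr
        intro x hx
        have := hpost_le x hx
        by_cases hxk : x.1 = W
        · simp [hxk]
        · have hb : (x.1 == W) = false := by simp [hxk]
          rw [hb]
          simp
      rw [h1, if_pos h2, List.nil_append, List.map_cons, List.sum_cons, hfc]
    have hsumA : ((((if u < p.2 then [(p.1, p.2 - u)] else []) ++ post).filter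
        (fun x => decide (0 < x.2) && (x.1 == W))).map (·.2)).sum
        = (if u < p.2 then p.2 - u else 0)
          + ((post.filter (fun x => decide (0 < x.2) && (x.1 == W))).map (·.2)).sum := by
      rw [List.filter_append, List.map_append, List.sum_append]
      congr 1
      split
      · rename_i hcu
        rw [List.filter_cons]
        rw [if_pos (by simp; omega)]
        simp
      · simp
    have hmemA : (∃ x ∈ (if u < p.2 then [(p.1, p.2 - u)] else []) ++ post, 0 < x.2 ∧ x.1 = W)
        ↔ (u < p.2 ∨ post.filter (fun x => decide (0 < x.2) && (x.1 == W)) ≠ []) := by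
      constructor
      · rintro ⟨x, hx, hx2, hx1⟩
        rcases List.mem_append.mp hx with hx | hx
        · split at hx
          · exact Or.inl (by assumption)
          · simp at hx
        · refine Or.inr ?_
          rw [Ne, List.filter_eq_nil_iff]
          push Not
          exact ⟨x, hx, by simp [hx1, hx2]⟩
      · rintro (hcu | hne)
        · exact ⟨(p.1, p.2 - u), List.mem_append.mpr (Or.inl (by rw [if_pos hcu]; simp)),
            by simp; omega, rfl⟩
        · rw [Ne, List.filter_eq_nil_iff] at hne
          push Not at hne
          obtain ⟨x, hx, hpx⟩ := hne
          simp at hpx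
          exact ⟨x, List.mem_append.mpr (Or.inr hx), hpx.1, hpx.2⟩
    rw [hmemA, hsumA, hsumB]
    by_cases hcu : u < p.2
    · rw [if_pos hcu]
      constructor
      · rintro ⟨-, hv⟩
        have h0 := hps.1
        exact ⟨⟨hmemB, by omega⟩, by omega⟩
      · rintro ⟨⟨-, hv⟩, hvpos⟩
        exact ⟨Or.inl hcu, by omega⟩
    · rw [if_neg hcu]
      constructor
      · rintro ⟨hmem, hv⟩
        have hTP : post.filter (fun x => decide (0 < x.2) && (x.1 == W)) ≠ [] := by
          rcases hmem with h | h
          · exact absurd h hcu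
          · exact h
        have := hps.2.mpr hTP
        exact ⟨⟨hmemB, by omega⟩, by omega⟩
      · rintro ⟨⟨-, hv⟩, hvpos⟩
        have hTPs : 0 < ((post.filter (fun x => decide (0 < x.2) && (x.1 == W))).map (·.2)).sum := by
          omega
        exact ⟨Or.inr (hps.2.mp hTPs), by omega⟩
  · -- W < k : nothing on either side
    have hmemA : ¬ (∃ x ∈ (if u < p.2 then [(p.1, p.2 - u)] else []) ++ post, 0 < x.2 ∧ x.1 = k) := by
      rintro ⟨x, hx, _, hx1⟩
      rcases List.mem_append.mp hx with hx | hx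
      · split at hx
        · rw [List.mem_singleton] at hx
          subst hx
          simp at hx1
          omega
        · simp at hx
      · have := hpost_le x hx
        omega
    have hmemB : ¬ (∃ x ∈ l, (0 < x.2 ∧ x.1 ≤ W) ∧ x.1 = k) := by
      rintro ⟨x, _, ⟨_, hle⟩, hx1⟩
      omega
    constructor
    · rintro ⟨hne, -⟩
      exact absurd hne hmemA
    · rintro ⟨⟨hne, -⟩, -⟩
      exact absurd hne hmemB


lemma pv_get?_ext (d₁ d₂ : PySem.Dict Int Int) (k : Int)
    (h : ∀ v, d₁.get? k = some v ↔ d₂.get? k = some v) : d₁.get? k = d₂.get? k := by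
  cases h₁ : d₁.get? k with
  | some v => exact ((h v).mp h₁).symm
  | none =>
    cases h₂ : d₂.get? k with
    | some w => rw [(h w).mpr h₂] at h₁; cases h₁
    | none => rfl

lemma pv_normalizar_perm (l₁ l₂ : List (Int × Int)) (h : l₁.Perm l₂) :
    normalizar l₁ = normalizar l₂ := by
  show PySem.List.sorted (pvAcc (fun x => 0 < x.2) l₁).items (fun x => x.1) true
      = PySem.List.sorted (pvAcc (fun x => 0 < x.2) l₂).items (fun x => x.1) true
  have hperm : (pvAcc (fun x => 0 < x.2) l₁).items.Perm (pvAcc (fun x => 0 < x.2) l₂).items := by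
    apply pv_items_perm_of_get?_eq _ _ (pv_acc_nodup _ _) (pv_acc_nodup _ _)
    intro k
    apply pv_get?_ext
    intro v
    rw [pv_get?_char, pv_get?_char, pv_acc_mem_keys, pv_acc_mem_keys, pv_acc_getD, pv_acc_getD]
    have hm : (∃ p ∈ l₁, 0 < p.2 ∧ p.1 = k) ↔ (∃ p ∈ l₂, 0 < p.2 ∧ p.1 = k) := by
      constructor
      · rintro ⟨x, hx, hP⟩; exact ⟨x, h.mem_iff.mp hx, hP⟩
      · rintro ⟨x, hx, hP⟩; exact ⟨x, h.mem_iff.mpr hx, hP⟩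
    rw [hm, ((h.filter _).map (·.2)).sum_eq]
  have hnd : ((pvAcc (fun x => 0 < x.2) l₁).items.map (·.1)).Nodup := pv_acc_nodup _ l₁
  exact pv_sorted_rev_fst_congr _ _ hnd hperm

lemma pv_main (j : Int) (l : List (Int × Int)) :
    agrupamento_base_sobras j l = agrupamento_base_sobras_alt j l := by
  by_cases hnil : l = []
  · subst hnil; rfl
  · have hordperm : (PySem.List.sorted l (fun x : Int × Int => x.1) true).Perm l :=
      PySem.List.sorted_perm _ _ _
    cases hbf : l.foldl
        (fun (b : Option (Int × Int)) (p : Int × Int) =>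
          if 0 < p.2 ∧ 0 < p.1 ∧ p.1 ≤ j ∧ (∀ s ∈ b, s.1 < p.1) then some p else b) none with
    | none =>
      have hbf' : l.foldl (pvBfStep j) none = none := hbf
      have hall : ∀ p ∈ l, pvValid j p = false := ((pv_bf_none j l none).mp hbf').2
      have hlA : agrupLoopA j (PySem.List.sorted l (fun x : Int × Int => x.1) true) = none := by
        rw [pv_loop_none]
        intro p hp
        exact hall p (hordperm.mem_iff.mp hp)
      have hA : agrupamento_base_sobras j l =
          (none, normalizar (PySem.List.sorted l (fun x : Int × Int => x.1) true)) := by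
        simp only [agrupamento_base_sobras]
        rw [if_neg hnil, hlA]
      have hB : agrupamento_base_sobras_alt j l = (none, normalizar l) := by
        simp only [agrupamento_base_sobras_alt]
        rw [hbf]
      rw [hA, hB, pv_normalizar_perm _ _ hordperm]
    | some r =>
      have hbf' : l.foldl (pvBfStep j) none = some r := hbf
      cases hl : agrupLoopA j (PySem.List.sorted l (fun x : Int × Int => x.1) true) with
      | none =>
        exfalso
        have hall : ∀ p ∈ l, pvValid j p = false := by
          intro p hp
          exact (pv_loop_none j _).mp hl p (hordperm.mem_iff.mpr hp)
        have := (pv_bf_none j l none).mpr ⟨rfl, hall⟩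
        rw [hbf'] at this
        cases this
      | some out =>
        obtain ⟨pre, p, post, hsplit, hpre, hpv, hout⟩ := pv_loop_some j _ out hl
        -- order facts about the sorted split
        have hpair := PySem.List.sorted_pairwise_rev (xs := l) (key := fun x : Int × Int => x.1)
        rw [hsplit, List.pairwise_append] at hpair
        have hpost_le : ∀ y ∈ post, y.1 ≤ p.1 := (List.pairwise_cons.mp hpair.2.1).1
        have hpl : p ∈ l := hordperm.mem_iff.mp (by rw [hsplit]; simp)
        -- facts about B's winner r
        obtain ⟨hmax, -, hmem⟩ := pv_bf_strong j l none r hbf'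
        have hrl : r ∈ l ∧ pvValid j r = true := by
          rcases hmem with h | h
          · cases h
          · exact h
        rcases pv_bf_first j l none r hbf' with h | ⟨l₁, l₂, hsp, hl₁, -, hrv⟩
        · cases h
        -- the two widths agree
        have hW : p.1 = r.1 := by
          have le1 : p.1 ≤ r.1 := hmax p hpl hpv
          have le2 : r.1 ≤ p.1 := by
            have hro : r ∈ pre ++ p :: post := by
              rw [← hsplit]
              exact hordperm.mem_iff.mpr hrl.1
            rcases List.mem_append.mp hro with hx | hx
            · exact absurd (hpre r hx) (by simp [hrl.2])
            · rcases List.mem_cons.mp hx with rfl | hx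
              · exact le_refl _
              · exact hpost_le r hx
          omega
        -- the winners coincide (stability of the sort at width p.1)
        have hfA : ((pre ++ p :: post).filter (fun x => x.1 == p.1)).find? (pvValid j)
            = some p := by
          rw [List.filter_append, List.find?_append]
          have h1 : (pre.filter (fun x => x.1 == p.1)).find? (pvValid j) = none := by
            rw [List.find?_eq_none]
            intro x hx
            rw [hpre x (List.mem_of_mem_filter hx)]
            simp
          rw [h1, Option.none_or, List.filter_cons, if_pos (by simp)]
          rw [List.find?_cons_of_pos hpv]
        have hfB : ((l.filter (fun x => x.1 == r.1)).find? (pvValid j)) = some r := by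
          rw [hsp, List.filter_append, List.find?_append]
          have h1 : (l₁.filter (fun x => x.1 == r.1)).find? (pvValid j) = none := by
            rw [List.find?_eq_none]
            intro x hx
            obtain ⟨hxm, hx1⟩ := List.mem_filter.mp hx
            rw [beq_iff_eq] at hx1
            intro hv
            exact hl₁ x hxm ⟨hv, by omega⟩
          rw [h1, Option.none_or, List.filter_cons, if_pos (by simp)]
          rw [List.find?_cons_of_pos hrv]
        have hpr : p = r := by
          have hstab := pv_filter_sorted_rev l p.1
          rw [hsplit] at hstab
          rw [hstab] at hfA
          rw [← hW] at hfB
          rw [hfA] at hfB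
          exact Option.some_inj.mp hfB
        subst hpr
        -- assemble both sides
        have hA : agrupamento_base_sobras j l = (some out.1, out.2) := by
          simp only [agrupamento_base_sobras]
          rw [if_neg hnil, hl]
        have hB : agrupamento_base_sobras_alt j l =
            ((some (p.1, min (PySem.Int.floordiv j p.1) p.2)),
              PySem.List.sorted
                (((pvAcc (fun x => 0 < x.2 ∧ x.1 ≤ p.1) l).modify p.1 0
                    (· - min (PySem.Int.floordiv j p.1) p.2)).items.filter
                  (fun it => 0 < it.2))
                (fun x => x.1) true) := by
          simp only [agrupamento_base_sobras_alt]
          rw [hbf]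
          obtain ⟨pw, pq⟩ := p
          rfl
        rw [hA, hB, hout]
        refine Prod.ext rfl ?_
        show normalizar _ = _
        -- both residual lists hold the same keyed quantities
        have hndk₂ : (((pvAcc (fun x => 0 < x.2 ∧ x.1 ≤ p.1) l).modify p.1 0
            (· - min (PySem.Int.floordiv j p.1) p.2)).keys).Nodup := by
          rw [pv_modify_keys _ _ _ (by
            refine (pv_acc_mem_keys _ l p.1).mpr ⟨p, hpl, ⟨?_, le_refl _⟩, rfl⟩
            exact ((pv_valid_iff j p).mp hpv).1)]
          exact pv_acc_nodup _ _
        have hnd₂ : (((pvAcc (fun x => 0 < x.2 ∧ x.1 ≤ p.1) l).modify p.1 0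
            (· - min (PySem.Int.floordiv j p.1) p.2)).items).Nodup := hndk₂.of_map _
        have hnd₁ : ((pvAcc (fun x => 0 < x.2)
            ((if min (PySem.Int.floordiv j p.1) p.2 < p.2 then
              [(p.1, p.2 - min (PySem.Int.floordiv j p.1) p.2)] else []) ++ post)).items).Nodup :=
          (pv_acc_nodup _ _).of_map _
        have hperm12 : ((pvAcc (fun x => 0 < x.2)
            ((if min (PySem.Int.floordiv j p.1) p.2 < p.2 then
              [(p.1, p.2 - min (PySem.Int.floordiv j p.1) p.2)] else []) ++ post)).items).Perm
            (((pvAcc (fun x => 0 < x.2 ∧ x.1 ≤ p.1) l).modify p.1 0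
              (· - min (PySem.Int.floordiv j p.1) p.2)).items.filter (fun it => 0 < it.2)) := by
          rw [List.perm_ext_iff_of_nodup hnd₁ (hnd₂.sublist List.filter_sublist)]
          intro a
          rw [List.mem_filter]
          rw [← PySem.Dict.get?_eq_some_iff_mem_items _ a.1 a.2 (pv_acc_nodup _ _),
              ← PySem.Dict.get?_eq_some_iff_mem_items _ a.1 a.2 hndk₂]
          rw [pv_key_iff j l pre post p hsplit hpre hpv a.1 a.2]
          simp
        show PySem.List.sorted (pvAcc (fun x => 0 < x.2) _).items (fun x => x.1) true = _
        exact pv_sorted_rev_fst_congr _ _ (pv_acc_nodup _ _) hperm12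

-- ===== VERDICT (by name: the statement is the Claim_ definition above) =====
theorem agrupamento_base_sobras_spec : Claim_equal_agrupamento_base_sobras := by
  intro j l _
  show agrupamento_base_sobras j l = agrupamento_base_sobras_alt j l
  exact pv_main j l
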